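-- pv_equiv track=rewrite | github.com/jianlingl/adapter-parsers | conver_UD.py | assign_head
-- ===== SOURCE A (Python) =====
-- def assign_head(production: list) -> int:
--     # ('NP', 'VP', 'AJP', 'AVP', 'PP', 'S', 'CONJP', 'COP', 'X')
--     # ('ADJ', 'ADP', 'PUNCT', 'ADV', 'AUX', 'SYM', 'INTJ', 'CCONJ', 'X', 'NOUN', 'DET', 'PROPN', 'NUM', 'VERB', 'PART', 'PRON', 'SCONJ')
--     head_priorities = ['VP', 'VERB', 'NP', 'PROPN', 'NOUN', 'PRON', 'AJP', 'ADJ', 'S', 'CONJP', 'SCONJ', 'COP', 'CCONJ', 'AVP', 'ADV', 'PP']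
--     head_idx = None
--     for head in head_priorities:
--         if head in production:
--             head_idx = production.index(head)
--             break
--         else:
--             pass
--     if head_idx is None:
--         head_idx = 0
--     return head_idx
-- ===== SOURCE B (Python) =====
-- def assign_head(production: list) -> int:
--     head_priorities = ['VP', 'VERB', 'NP', 'PROPN', 'NOUN', 'PRON', 'AJP', 'ADJ', 'S', 'CONJP', 'SCONJ', 'COP', 'CCONJ', 'AVP', 'ADV', 'PP']
--     rank = {label: i for i, label in enumerate(head_priorities)}
--     best_rank = None
--     best_idx = 0
--     for i, x in enumerate(production):
--         r = rank.get(x)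
--         if r is not None and (best_rank is None or r < best_rank):
--             best_rank = r
--             best_idx = i
--     return best_idx
-- ===== Notes on version B (the rewrite author's own statement) =====
-- stated objective: idiomatic
-- what changed: Instead of scanning the production once per priority label (outer loop over the 16 priorities with a membership test plus an .index scan), B builds a label-to-rank dict once and does a single pass over the production keeping the first element of strictly smallest rank.
import Mathlib
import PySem

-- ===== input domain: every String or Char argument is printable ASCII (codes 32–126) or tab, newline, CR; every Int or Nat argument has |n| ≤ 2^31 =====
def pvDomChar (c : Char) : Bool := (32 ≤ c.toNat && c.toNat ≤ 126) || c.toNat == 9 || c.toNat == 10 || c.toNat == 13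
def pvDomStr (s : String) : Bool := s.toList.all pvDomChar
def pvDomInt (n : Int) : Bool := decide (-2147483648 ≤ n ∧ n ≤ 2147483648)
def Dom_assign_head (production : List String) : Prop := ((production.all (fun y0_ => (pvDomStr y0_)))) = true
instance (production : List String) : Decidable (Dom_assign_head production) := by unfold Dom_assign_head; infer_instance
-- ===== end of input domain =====

-- B replaces A's outer loop over the 16 priority labels (each with a membership scan and an
-- .index scan of the production) by one rank dict built once and a single pass over the
-- production keeping the first element of strictly smallest rank; same value everywhere.

def pvHeadPriorities : List String :=
  ["VP", "VERB", "NP", "PROPN", "NOUN", "PRON", "AJP", "ADJ", "S", "CONJP", "SCONJ", "COP", "CCONJ", "AVP", "ADV", "PP"]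

-- ===== PORT A =====
-- A's for-loop with break: the first priority label contained in production wins
def assignHeadLoop (production : List String) : List String → Option Int
  | [] => none
  | h :: rest =>
    if production.contains h then (PySem.List.index? production h).map Int.ofNat
    else assignHeadLoop production rest

def assign_head (production : List String) : Int :=
  match assignHeadLoop production pvHeadPriorities with
  | some i => i
  | none => 0

-- ===== PORT B =====
-- rank = {label: i for i, label in enumerate(head_priorities)}
def pvRank : PySem.Dict String Int :=
  (PySem.List.enumerate pvHeadPriorities).foldl (fun d p => d.insert p.2 p.1) PySem.Dict.empty

-- one iteration of B's for-loop body; acc = (best_rank, best_idx)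
def bestStep (acc : Option Int × Int) (p : Int × String) : Option Int × Int :=
  match PySem.Dict.get? pvRank p.2 with
  | none => acc
  | some r =>
    match acc.1 with
    | none => (some r, p.1)
    | some br => if r < br then (some r, p.1) else acc

def assign_head_alt (production : List String) : Int :=
  ((PySem.List.enumerate production).foldl bestStep (none, 0)).2

-- ===== PRECONDITION & SPEC =====
def Spec_assign_head (production : List String) (out : Int) : Prop := out = assign_head_alt production
instance (production : List String) (out : Int) : Decidable (Spec_assign_head production out) := by unfold Spec_assign_head; infer_instance

-- ===== CLAIM (what is proved, stated in full; the proofs are below) =====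
def Claim_equal_assign_head : Prop := ∀ (production : List String), Dom_assign_head production → Spec_assign_head production (assign_head production)

-- ===== LEMMAS AND PROOFS =====

-- the dict lookup is exactly "index of the label in the priority list"
theorem rank_eq (s : String) :
    PySem.Dict.get? pvRank s = (PySem.List.index? pvHeadPriorities s).map Int.ofNat := by
  by_cases hs : s ∈ pvHeadPriorities
  · simp only [pvHeadPriorities, List.mem_cons, List.not_mem_nil, or_false] at hs
    rcases hs with rfl|rfl|rfl|rfl|rfl|rfl|rfl|rfl|rfl|rfl|rfl|rfl|rfl|rfl|rfl|rfl <;> decide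
  · rw [(PySem.List.index?_eq_none_iff _ _).mpr hs, Option.map_none,
      (PySem.Dict.get?_eq_none_iff_not_mem_keys _ _)]
    intro hmem
    apply hs
    have hk : pvRank.keys = pvHeadPriorities := by decide
    rwa [hk] at hmem

-- B's loop leaves the accumulator alone when nothing that remains is ranked
theorem fold_none (l : List String) (s : Int) (acc : Option Int × Int)
    (h : ∀ x ∈ l, PySem.Dict.get? pvRank x = none) :
    ((PySem.List.enumerate l s) |>.foldl bestStep acc) = acc := by
  induction l generalizing s acc with
  | nil => simp [PySem.List.enumerate_nil]
  | cons x l ih =>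
    rw [PySem.List.enumerate_cons, List.foldl_cons]
    have hx := h x (by simp)
    have : bestStep acc (s, x) = acc := by simp [bestStep, hx]
    rw [this, ih _ _ (fun y hy => h y (by simp [hy]))]

-- once the best rank r is at least as good as every remaining rank, the accumulator is final
theorem fold_keep (l : List String) (s : Int) (r : Int) (k : Int)
    (h : ∀ x ∈ l, ∀ v, PySem.Dict.get? pvRank x = some v → r ≤ v) :
    ((PySem.List.enumerate l s) |>.foldl bestStep (some r, k)) = (some r, k) := by
  induction l generalizing s with
  | nil => simp [PySem.List.enumerate_nil]
  | cons x l ih =>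
    rw [PySem.List.enumerate_cons, List.foldl_cons]
    have hstep : bestStep (some r, k) (s, x) = (some r, k) := by
      unfold bestStep
      cases hx : PySem.Dict.get? pvRank x with
      | none => simp
      | some v =>
        have := h x (by simp) v hx
        simp [show ¬ v < r by omega]
    rw [hstep]; exact ih _ (fun y hy v hv => h y (by simp [hy]) v hv)

-- the best rank in the accumulator is none or the rank of some processed element
theorem fold_fst (l : List String) (s : Int) (acc : Option Int × Int) :
    ((PySem.List.enumerate l s) |>.foldl bestStep acc).1 = acc.1 ∨
      ∃ x ∈ l, ((PySem.List.enumerate l s) |>.foldl bestStep acc).1 = PySem.Dict.get? pvRank x := by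
  induction l generalizing s acc with
  | nil => left; simp [PySem.List.enumerate_nil]
  | cons x l ih =>
    rw [PySem.List.enumerate_cons, List.foldl_cons]
    rcases ih (s+1) (bestStep acc (s, x)) with h | ⟨y, hy, h⟩
    · rw [h]
      unfold bestStep
      cases hx : PySem.Dict.get? pvRank x with
      | none => left; rfl
      | some v =>
        cases hacc : acc.1 with
        | none => right; exact ⟨x, by simp, by simp [hx]⟩
        | some br =>
          by_cases hlt : v < br
          · right; exact ⟨x, by simp, by simp [hlt, hx]⟩
          · left; simp only [hlt, if_false]; exact hacc
    · right; exact ⟨y, by simp [hy], h⟩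

-- A's loop returning none means no priority label occurs in production
theorem aLoop_none (production : List String) (ps : List String)
    (h : assignHeadLoop production ps = none) : ∀ q ∈ ps, q ∉ production := by
  induction ps with
  | nil => simp
  | cons p ps ih =>
    intro q hq
    unfold assignHeadLoop at h
    by_cases hc : p ∈ production
    · simp [hc] at h
    · rcases List.mem_cons.mp hq with rfl | hq'
      · exact hc
      · exact ih (by simpa [hc] using h) q hq'

-- A's loop returning some i splits the priority list at the first label present
theorem aLoop_some (production : List String) (ps : List String) (i : Int)
    (h : assignHeadLoop production ps = some i) :
    ∃ q1 p q2, ps = q1 ++ p :: q2 ∧ (∀ q ∈ q1, q ∉ production) ∧ p ∈ production ∧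
      (PySem.List.index? production p).map Int.ofNat = some i := by
  induction ps with
  | nil => simp [assignHeadLoop] at h
  | cons p ps ih =>
    unfold assignHeadLoop at h
    by_cases hc : p ∈ production
    · refine ⟨[], p, ps, rfl, by simp, hc, ?_⟩
      simpa [hc] using h
    · rcases ih (by simpa [hc] using h) with ⟨q1, p', q2, hsplit, habs, hmem, hidx⟩
      exact ⟨p :: q1, p', q2, by simp [hsplit], by
        intro q hq
        rcases List.mem_cons.mp hq with rfl | hq'
        · exact hc
        · exact habs q hq', hmem, hidx⟩

-- ===== VERDICT (by name: the statement is the Claim_ definition above) =====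
theorem assign_head_spec : Claim_equal_assign_head := by
  intro production _
  unfold Spec_assign_head assign_head
  cases hA : assignHeadLoop production pvHeadPriorities with
  | none =>
    have habs := aLoop_none production pvHeadPriorities hA
    have hall : ∀ x ∈ production, PySem.Dict.get? pvRank x = none := by
      intro x hx
      rw [rank_eq, (PySem.List.index?_eq_none_iff _ _).mpr, Option.map_none]
      intro hxP
      exact habs x hxP hx
    unfold assign_head_alt
    rw [fold_none production 0 (none, 0) hall]
  | some i =>
    rcases aLoop_some production pvHeadPriorities i hA with ⟨q1, p, q2, hsplit, habs, hmem, hidx⟩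
    rcases Option.map_eq_some_iff.mp hidx with ⟨k, hk, hik⟩
    -- rank of p is q1.length
    have hnd : pvHeadPriorities.Nodup := by decide
    have hpq1 : p ∉ q1 := by
      rw [hsplit] at hnd
      have := (List.nodup_append.mp hnd).2.2
      intro hpmem
      exact this p hpmem p (List.mem_cons_self ..) rfl
    have hrp : PySem.List.index? pvHeadPriorities p = some q1.length := by
      rw [hsplit]
      exact (PySem.List.index?_eq_some_iff _ _ _).mpr ⟨q1, q2, rfl, rfl, hpq1⟩
    have hPr : pvHeadPriorities[q1.length]'(by rw [hsplit]; simp) = p := by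
      rcases PySem.List.getElem_of_index?_eq_some hrp with ⟨hlt, hget, _⟩
      exact hget
    -- every ranked element of production has rank ≥ q1.length
    have hmin : ∀ x ∈ production, ∀ v, PySem.Dict.get? pvRank x = some v →
        (q1.length : Int) ≤ v := by
      intro x hx v hv
      rw [rank_eq] at hv
      rcases Option.map_eq_some_iff.mp hv with ⟨m, hm, hvm⟩
      rw [Int.ofNat_eq_natCast] at hvm
      rcases PySem.List.getElem_of_index?_eq_some hm with ⟨hmlt, hgm, _⟩
      subst hvm
      by_contra hcon
      have hmlt' : m < q1.length := by omega
      have hx1 : x ∈ q1 := by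
        rw [List.getElem_of_eq hsplit] at hgm
        rw [List.getElem_append_left hmlt'] at hgm
        exact hgm ▸ List.getElem_mem _
      exact habs x hx1 hx
    -- and rank = q1.length only for p itself
    have huniq : ∀ x, PySem.Dict.get? pvRank x = some (q1.length : Int) → x = p := by
      intro x hv
      rw [rank_eq] at hv
      rcases Option.map_eq_some_iff.mp hv with ⟨m, hm, hvm⟩
      rw [Int.ofNat_eq_natCast] at hvm
      have hmq : m = q1.length := by exact_mod_cast hvm
      rcases PySem.List.getElem_of_index?_eq_some hm with ⟨hmlt, hgm, _⟩
      subst hmq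
      rw [hPr] at hgm
      exact hgm.symm
    -- split production at the first occurrence of p
    rcases (PySem.List.index?_eq_some_iff _ _ _).mp hk with ⟨pre, suf, hprod, hlen, hppre⟩
    have hrank_p : PySem.Dict.get? pvRank p = some (q1.length : Int) := by
      rw [rank_eq, hrp]; rfl
    -- run B's fold over the decomposition
    unfold assign_head_alt
    rw [hprod, PySem.List.enumerate_append, List.foldl_append, PySem.List.enumerate_cons,
      List.foldl_cons]
    set acc := (PySem.List.enumerate pre 0).foldl bestStep (none, 0) with hacc
    have hstep : bestStep acc ((0 : Int) + pre.length, p) = (some (q1.length : Int), (pre.length : Int)) := by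
      have hfst := fold_fst pre 0 (none, 0)
      rw [← hacc] at hfst
      unfold bestStep
      rw [hrank_p]
      rcases hfst with h1 | ⟨x, hxpre, h1⟩
      · simp only [h1]; simp
      · cases hbr : acc.1 with
        | none => simp
        | some br =>
          have hxr : PySem.Dict.get? pvRank x = some br := by rw [← h1, hbr]
          have hge : (q1.length : Int) ≤ br :=
            hmin x (by rw [hprod]; exact List.mem_append_left _ hxpre) br hxr
          have hne : br ≠ (q1.length : Int) := by
            intro he
            exact hppre ((huniq x (he ▸ hxr)) ▸ hxpre)
          have : (q1.length : Int) < br := lt_of_le_of_ne hge (fun h => hne h.symm)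
          simp [this]
    rw [hstep]
    have hsuf : ∀ x ∈ suf, ∀ v, PySem.Dict.get? pvRank x = some v → (q1.length : Int) ≤ v := by
      intro x hx v hv
      exact hmin x (by rw [hprod]; exact List.mem_append_right _ (List.mem_cons_of_mem _ hx)) v hv
    rw [fold_keep suf _ _ _ hsuf]
    simp [← hik, ← hlen]
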